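-- pv_equiv track=rewrite | github.com/ahmedazab888/design | design/latin_square.py | _default_square
-- ===== SOURCE A (Python) =====
-- def _default_square(k):
--     lookup = [0] * (2 * k)
--     square = []
--     for i in range(k):
--         row = []
--         for j in range(k):
--             row.append(0)
--         square.append(row)
--     for a in range(2):
--         for i in range(k):
--             lookup[a * k + i] = i
--     for y in range(k):
--         for x in range(k):
--             square[y][x] = lookup[x + y]
--     return square
-- ===== SOURCE B (Python) =====
-- def _default_square(k):
--     base = list(range(k))
--     return [base[y:] + base[:y] for y in range(k)]
-- ===== Notes on version B (the rewrite author's own statement) =====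
-- stated objective: simpler
-- what changed: Replaces the zero-filled table, the 2k-entry lookup list and the nested index-assignment loops by building the base row list(range(k)) once and emitting each row as the slice rotation base[y:] + base[:y].
import Mathlib
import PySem

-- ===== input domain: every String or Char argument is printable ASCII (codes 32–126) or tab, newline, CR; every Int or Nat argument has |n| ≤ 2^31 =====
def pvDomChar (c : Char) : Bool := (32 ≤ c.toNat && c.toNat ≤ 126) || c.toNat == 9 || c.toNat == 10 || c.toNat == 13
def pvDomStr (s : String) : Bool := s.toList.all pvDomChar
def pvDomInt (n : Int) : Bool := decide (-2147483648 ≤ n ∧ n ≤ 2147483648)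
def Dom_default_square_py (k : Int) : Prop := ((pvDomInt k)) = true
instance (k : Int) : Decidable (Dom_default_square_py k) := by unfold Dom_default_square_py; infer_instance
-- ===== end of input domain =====

-- B replaces A's zero table + 2k-entry lookup list + index-assignment loops by one base row
-- list(range(k)) and per-row slice rotations base[y:] + base[:y] (simpler decomposition; same values).

-- ===== PORT A =====
-- All list indices A uses (a*k+i, y, x, x+y) are in range on every input, so the total
-- forms pySetD/pyGetD are exact transliterations of Python's lookup[..]=.., square[y][x]=..
def default_square_py (k : Int) : List (List Int) :=
  let lookup : List Int := List.replicate (2 * k).toNat 0      -- [0] * (2*k)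
  let square : List (List Int) :=
    (PySem.List.pyRange 0 k 1).foldl (fun sq _i =>
      sq ++ [(PySem.List.pyRange 0 k 1).foldl (fun row _j => row ++ [(0 : Int)]) []]) []
  let lookup :=
    (PySem.List.pyRange 0 2 1).foldl (fun lk a =>
      (PySem.List.pyRange 0 k 1).foldl (fun lk i => PySem.List.pySetD lk (a * k + i) i) lk) lookup
  (PySem.List.pyRange 0 k 1).foldl (fun sq y =>
    (PySem.List.pyRange 0 k 1).foldl (fun sq x =>
      PySem.List.pySetD sq y
        (PySem.List.pySetD (PySem.List.pyGetD sq y []) x (PySem.List.pyGetD lookup (x + y) 0))) sq) square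

-- ===== PORT B =====
def default_square_py_alt (k : Int) : List (List Int) :=
  let base := PySem.List.pyRange 0 k 1                          -- list(range(k))
  (PySem.List.pyRange 0 k 1).map (fun y =>
    PySem.List.slice base (some y) none ++ PySem.List.slice base none (some y))

-- ===== PRECONDITION & SPEC =====
def Spec_default_square_py (k : Int) (out : List (List Int)) : Prop := out = default_square_py_alt k
instance (k : Int) (out : List (List Int)) : Decidable (Spec_default_square_py k out) := by unfold Spec_default_square_py; infer_instance

-- ===== CLAIM (what is proved, stated in full; the proofs are below) =====
def Claim_equal_default_square_py : Prop := ∀ (k : Int), Dom_default_square_py k → Spec_default_square_py k (default_square_py k)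

-- ===== LEMMAS AND PROOFS =====

theorem pv_fill_seg {α : Type} (z : α) (f : Nat → α) :
    ∀ (n : Nat) (pre post : List α),
      (List.range n).foldl (fun l i => l.set (pre.length + i) (f i))
        (pre ++ List.replicate n z ++ post)
      = pre ++ (List.range n).map f ++ post := by
  intro n
  induction n with
  | zero => intro pre post; simp
  | succ m ih =>
    intro pre post
    have hrep : List.replicate (m + 1) z = List.replicate m z ++ [z] := by
      simp [List.replicate_succ']
    rw [List.range_succ, List.foldl_append, hrep]
    have : pre ++ (List.replicate m z ++ [z]) ++ post = pre ++ List.replicate m z ++ (z :: post) := by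
      simp
    rw [this, ih pre (z :: post)]
    simp only [List.foldl_cons, List.foldl_nil]
    rw [show pre ++ List.map f (List.range m) ++ z :: post
          = (pre ++ List.map f (List.range m)) ++ z :: post from rfl,
        List.set_append_right _ _ (by simp)]
    simp

theorem pv_inner_pure (v : Nat → Int) (y : Nat) :
    ∀ (xs : List Nat) (sq : List (List Int)), y < sq.length →
      xs.foldl (fun sq x => sq.set y ((sq.getD y []).set x (v x))) sq
      = sq.set y (xs.foldl (fun row x => row.set x (v x)) (sq.getD y [])) := by
  intro xs
  induction xs with
  | nil =>
    intro sq hy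
    simp only [List.foldl_nil]
    rw [List.getD_eq_getElem?_getD, List.getElem?_eq_getElem hy, Option.getD_some,
        List.set_getElem_self]
  | cons x xs ih =>
    intro sq hy
    simp only [List.foldl_cons]
    rw [ih _ (by simpa using hy), List.set_set]
    congr 1
    rw [List.getD_eq_getElem _ _ (by simpa using hy), List.getElem_set_self,
        List.getD_eq_getElem _ _ hy]

theorem pv_inner (v : Nat → Int) (y : Nat) :
    ∀ (xs : List Nat) (sq : List (List Int)), y < sq.length →
      xs.foldl (fun sq (x : Nat) =>
        PySem.List.pySetD sq (y : Int)
          (PySem.List.pySetD (PySem.List.pyGetD sq (y : Int) []) (x : Int) (v x))) sq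
      = sq.set y (xs.foldl (fun row x => row.set x (v x)) (sq.getD y [])) := by
  intro xs sq hy
  simp only [PySem.List.pySetD_natCast, PySem.List.pyGetD_natCast]
  exact pv_inner_pure v y xs sq hy

theorem pv_outer_pure (n : Nat) (v : Nat → Nat → Int) :
    ∀ (m : Nat) (post : List (List Int)),
      (List.range m).foldl (fun sq y =>
          sq.set y ((List.range n).foldl (fun row x => row.set x (v y x)) (sq.getD y [])))
        (List.replicate m (List.replicate n (0 : Int)) ++ post)
      = (List.range m).map (fun y =>
          (List.range n).foldl (fun row x => row.set x (v y x)) (List.replicate n 0)) ++ post := by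
  intro m
  induction m with
  | zero => intro post; simp
  | succ m ih =>
    intro post
    rw [List.range_succ, List.foldl_append,
        show List.replicate (m+1) (List.replicate n (0:Int)) ++ post
           = List.replicate m (List.replicate n (0:Int)) ++ (List.replicate n 0 :: post) by
          simp [List.replicate_succ'],
        ih (List.replicate n 0 :: post)]
    simp only [List.foldl_cons, List.foldl_nil]
    rw [List.getD_eq_getElem?_getD, List.getElem?_append_right (by simp),
        show m - (List.map _ (List.range m)).length = 0 by simp]
    rw [List.set_append_right _ _ (by simp),
        show m - (List.map _ (List.range m)).length = 0 by simp]
    simp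

theorem pv_pass0 (n : Nat) :
    (List.range n).foldl (fun lk (j : Nat) => PySem.List.pySetD lk (j : Int) (j : Int))
      (List.replicate n (0 : Int) ++ List.replicate n 0)
    = (List.range n).map (fun j : Nat => (j : Int)) ++ List.replicate n 0 := by
  have h0 := pv_fill_seg (0 : Int) (fun j : Nat => (j : Int)) n [] (List.replicate n 0)
  simp only [List.length_nil, Nat.zero_add, List.nil_append] at h0
  simpa only [PySem.List.pySetD_natCast] using h0

theorem pv_pass1 (n : Nat) :
    (List.range n).foldl (fun lk (j : Nat) => PySem.List.pySetD lk ((n : Int) + (j : Int)) (j : Int))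
      ((List.range n).map (fun j : Nat => (j : Int)) ++ List.replicate n 0)
    = (List.range n).map (fun j : Nat => (j : Int)) ++ (List.range n).map (fun j : Nat => (j : Int)) := by
  have h1 := pv_fill_seg (0 : Int) (fun j : Nat => (j : Int)) n
      ((List.range n).map (fun j : Nat => (j : Int))) []
  simp only [List.length_map, List.length_range, List.append_nil] at h1
  simpa only [← Nat.cast_add, PySem.List.pySetD_natCast] using h1

theorem pv_lookup (n : Nat) :
    (PySem.List.pyRange 0 2 1).foldl (fun lk a =>
        (PySem.List.pyRange 0 (n : Int) 1).foldl
          (fun lk i => PySem.List.pySetD lk (a * (n : Int) + i) i) lk)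
      (List.replicate (2 * (n : Int)).toNat 0)
    = (List.range n).map (fun j : Nat => (j : Int)) ++ (List.range n).map (fun j : Nat => (j : Int)) := by
  rw [show PySem.List.pyRange 0 2 1 = [0, 1] by decide,
      show (2 * (n : Int)).toNat = 2 * n by omega]
  simp only [List.foldl_cons, List.foldl_nil]
  rw [PySem.List.pyRange_one]
  have e1 : (List.foldl (fun lk i => PySem.List.pySetD lk (0 * (n : Int) + i) i)
      (List.replicate (2 * n) (0 : Int))
      ((List.range ((n : Int) - 0).toNat).map fun k : Nat => (0 : Int) + k))
      = (List.range n).map (fun j : Nat => (j : Int)) ++ List.replicate n 0 := by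
    rw [show List.replicate (2 * n) (0 : Int) = List.replicate n 0 ++ List.replicate n 0 by
          rw [← List.replicate_add]; congr 1; omega]
    simp only [Int.sub_zero, Int.toNat_natCast, List.foldl_map, zero_mul, zero_add]
    exact pv_pass0 n
  rw [e1]
  simp only [Int.sub_zero, Int.toNat_natCast, List.foldl_map, one_mul, zero_add]
  exact pv_pass1 n

theorem pv_rowfill (n : Nat) (f : Nat → Int) :
    (List.range n).foldl (fun row x => row.set x (f x)) (List.replicate n 0)
    = (List.range n).map f := by
  have h := pv_fill_seg (0 : Int) f n [] []
  simpa only [List.length_nil, Nat.zero_add, List.nil_append, List.append_nil] using h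

theorem pv_foldl_congr_inv {α β : Type} (P : α → Prop) (f g : α → β → α) :
    ∀ (l : List β) (a : α), P a →
      (∀ a, P a → ∀ b ∈ l, f a b = g a b ∧ P (g a b)) →
      l.foldl f a = l.foldl g a := by
  intro l
  induction l with
  | nil => intro a _ _; rfl
  | cons b l ih =>
    intro a ha h
    obtain ⟨he, hp⟩ := h a ha b (by simp)
    simp only [List.foldl_cons, he]
    exact ih (g a b) hp (fun a ha c hc => h a ha c (by simp [hc]))

-- ===== PORT A =====
-- All list indices A uses (a*k+i, y, x, x+y) are in range on every input, so the total
-- forms pySetD/pyGetD are exact transliterations of Python's lookup[..]=.., square[y][x]=..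

theorem pv_row (n y : Nat) (hy : y < n) :
    (List.range n).map (fun x : Nat =>
        (((List.range n).map (fun j : Nat => (j : Int)) ++ (List.range n).map (fun j : Nat => (j : Int))).getD (x + y) 0))
    = ((List.range n).map (fun j : Nat => (j : Int))).drop y
      ++ ((List.range n).map (fun j : Nat => (j : Int))).take y := by
  apply List.ext_getElem
  · simp; omega
  · intro x hx1 hx2
    have hx : x < n := by simpa using hx1
    rw [List.getElem_map, List.getElem_range,
        List.getD_eq_getElem _ _ (by simp; omega)]
    by_cases hxy : x + y < n
    · rw [List.getElem_append_left (by simpa using hxy),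
          List.getElem_map, List.getElem_range,
          List.getElem_append_left (by simp; omega),
          List.getElem_drop, List.getElem_map, List.getElem_range]
      congr 1; omega
    · rw [List.getElem_append_right (by simp; omega),
          List.getElem_map, List.getElem_range,
          List.getElem_append_right (by simp; omega),
          List.getElem_take, List.getElem_map, List.getElem_range]
      simp only [List.length_map, List.length_range, List.length_drop]
      congr 1; omega

theorem pv_main (n : Nat) : default_square_py (n : Int) = default_square_py_alt (n : Int) := by
  show (PySem.List.pyRange 0 (n:Int) 1).foldl (fun sq y =>
      (PySem.List.pyRange 0 (n:Int) 1).foldl (fun sq x =>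
        PySem.List.pySetD sq y
          (PySem.List.pySetD (PySem.List.pyGetD sq y []) x
            (PySem.List.pyGetD
              ((PySem.List.pyRange 0 2 1).foldl (fun lk a =>
                (PySem.List.pyRange 0 (n:Int) 1).foldl
                  (fun lk i => PySem.List.pySetD lk (a * (n:Int) + i) i) lk)
                (List.replicate (2 * (n:Int)).toNat 0)) (x + y) 0))) sq)
      ((PySem.List.pyRange 0 (n:Int) 1).foldl (fun sq _i =>
        sq ++ [(PySem.List.pyRange 0 (n:Int) 1).foldl (fun row _j => row ++ [(0:Int)]) []]) [])
    = (PySem.List.pyRange 0 (n:Int) 1).map (fun y =>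
        PySem.List.slice (PySem.List.pyRange 0 (n:Int) 1) (some y) none
        ++ PySem.List.slice (PySem.List.pyRange 0 (n:Int) 1) none (some y))
  rw [pv_lookup n]
  have hrow : (PySem.List.pyRange 0 (n:Int) 1).foldl (fun row _j => row ++ [(0:Int)]) []
      = List.replicate n (0:Int) := by
    rw [PySem.List.foldl_append_singleton_eq_map (fun _ => (0:Int)) _ [], List.map_const']
    simp [PySem.List.length_pyRange_one]
  rw [hrow]
  have hsq : (PySem.List.pyRange 0 (n:Int) 1).foldl
      (fun sq _i => sq ++ [List.replicate n (0:Int)]) []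
      = List.replicate n (List.replicate n (0:Int)) := by
    rw [PySem.List.foldl_append_singleton_eq_map (fun _ => List.replicate n (0:Int)) _ [],
        List.map_const']
    simp [PySem.List.length_pyRange_one]
  rw [hsq]
  rw [PySem.List.pyRange_one]
  simp only [Int.sub_zero, Int.toNat_natCast, List.foldl_map, List.map_map, zero_add]
  simp only [Function.comp_def]
  simp only [PySem.List.slice_from_natCast, PySem.List.slice_to_natCast]
  rw [pv_foldl_congr_inv (fun sq => sq.length = n) _
        (fun sq y => sq.set y ((List.range n).foldl
            (fun row x => row.set x
              (PySem.List.pyGetD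
                (List.map (fun j : Nat => (j : Int)) (List.range n)
                  ++ List.map (fun j : Nat => (j : Int)) (List.range n))
                ((x : Int) + (y : Int)) 0)) (sq.getD y [])))
        (List.range n) _ (by simp)
        (fun sq hP y hy => ⟨pv_inner _ y (List.range n) sq (by rw [hP]; simpa using hy),
                            by simpa using hP⟩)]
  have hout := pv_outer_pure n (fun y x =>
      PySem.List.pyGetD
        (List.map (fun j : Nat => (j : Int)) (List.range n)
          ++ List.map (fun j : Nat => (j : Int)) (List.range n))
        ((x : Int) + (y : Int)) 0) n []
  simp only [List.append_nil] at hout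
  rw [hout]
  apply List.map_congr_left
  intro y hy
  rw [pv_rowfill]
  have hconv : (fun x : Nat =>
      PySem.List.pyGetD
        (List.map (fun j : Nat => (j : Int)) (List.range n)
          ++ List.map (fun j : Nat => (j : Int)) (List.range n))
        ((x : Int) + (y : Int)) 0)
      = (fun x : Nat =>
        ((List.range n).map (fun j : Nat => (j : Int))
          ++ (List.range n).map (fun j : Nat => (j : Int))).getD (x + y) 0) := by
    funext x
    rw [← Nat.cast_add, PySem.List.pyGetD_natCast]
  rw [hconv, pv_row n y (by simpa using hy)]

-- ===== VERDICT (by name: the statement is the Claim_ definition above) =====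
theorem default_square_py_spec : Claim_equal_default_square_py := by
  intro k _
  unfold Spec_default_square_py
  by_cases hk : 0 ≤ k
  · have := pv_main k.toNat
    rwa [Int.toNat_of_nonneg hk] at this
  · have h1 : PySem.List.pyRange 0 k 1 = [] := by
      rw [PySem.List.pyRange_one]
      simp
      omega
    simp [default_square_py, default_square_py_alt, h1]
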